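-- pv_equiv track=rewrite | github.com/brinaribic/Nakljucni-sprehod-v-lizikah | koda.py | zgeneriraj_pot
-- ===== SOURCE A (Python) =====
-- def zgeneriraj_pot(n,m=0):
--     sosedi = {};
--     for i in range(1,n+1):
--         sosedi[i+m] = [];
--         if n == 1:
--             return sosedi
--     for i in range(1,n+1):
--         if i == 1:
--             sosedi[i+m].append(2+m);
--         elif i==n:
--             sosedi[i+m].append(n-1+m);
--         else:
--             sosedi[i+m].append(i+m-1);
--             sosedi[i+m].append(i+m+1);
--     return sosedi
-- ===== SOURCE B (Python) =====
-- def zgeneriraj_pot(n, m=0):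
--     sosedi = {i + m: [] for i in range(1, n + 1)}
--     for i in range(1, n):
--         sosedi[i + m].append(i + 1 + m)
--         sosedi[i + 1 + m].append(i + m)
--     return sosedi
-- ===== Notes on version B (the rewrite author's own statement) =====
-- stated objective: simpler
-- what changed: Replaces A's early-return key loop plus first/last/middle branching over nodes with a dict comprehension for the keys and a single symmetric iteration over the n-1 edges, appending both endpoints of each edge.
import Mathlib
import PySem

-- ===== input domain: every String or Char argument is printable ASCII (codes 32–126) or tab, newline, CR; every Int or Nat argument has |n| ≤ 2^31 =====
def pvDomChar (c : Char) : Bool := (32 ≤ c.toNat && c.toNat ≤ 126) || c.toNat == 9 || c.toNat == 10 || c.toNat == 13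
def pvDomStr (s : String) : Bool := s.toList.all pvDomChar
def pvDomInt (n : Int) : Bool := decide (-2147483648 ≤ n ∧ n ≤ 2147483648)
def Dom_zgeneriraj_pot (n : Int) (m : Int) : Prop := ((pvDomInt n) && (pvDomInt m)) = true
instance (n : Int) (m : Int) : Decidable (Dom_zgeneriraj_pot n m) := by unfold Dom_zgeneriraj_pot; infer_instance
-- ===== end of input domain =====

-- B replaces A's early-return key loop and first/last/middle node branching by a key
-- comprehension plus one symmetric pass over the edges (same O(n) cost, plainer code).


-- ===== PORT A =====
-- first loop of A: inserts keys i+m and returns early (flag true) when n == 1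
def pvLoop1A (n m : Int) : List Int → PySem.Dict Int (List Int) → PySem.Dict Int (List Int) × Bool
  | [], d => (d, false)
  | i :: rest, d =>
      let d' := d.insert (i + m) []
      if n == 1 then (d', true) else pvLoop1A n m rest d'

-- body of A's second loop (the appends are dict-value mutations: modify with default [])
def pvStepA (n m : Int) (d : PySem.Dict Int (List Int)) (i : Int) : PySem.Dict Int (List Int) :=
  if i == 1 then d.modify (i + m) [] (fun l => l ++ [2 + m])
  else if i == n then d.modify (i + m) [] (fun l => l ++ [n - 1 + m])
  else (d.modify (i + m) [] (fun l => l ++ [i + m - 1])).modify (i + m) [] (fun l => l ++ [i + m + 1])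

def zgeneriraj_pot (n : Int) (m : Int) : List (Int × List Int) :=
  let r := pvLoop1A n m (PySem.List.pyRange 1 (n + 1)) PySem.Dict.empty
  if r.2 then r.1.items
  else ((PySem.List.pyRange 1 (n + 1)).foldl (pvStepA n m) r.1).items

-- ===== PORT B =====
-- body of B's edge loop: append both endpoints of edge (i, i+1)
def pvStepB (m : Int) (d : PySem.Dict Int (List Int)) (i : Int) : PySem.Dict Int (List Int) :=
  (d.modify (i + m) [] (fun l => l ++ [i + 1 + m])).modify (i + 1 + m) [] (fun l => l ++ [i + m])

def zgeneriraj_pot_alt (n : Int) (m : Int) : List (Int × List Int) :=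
  let d0 := (PySem.List.pyRange 1 (n + 1)).foldl (fun d i => d.insert (i + m) ([] : List Int)) PySem.Dict.empty
  ((PySem.List.pyRange 1 n).foldl (pvStepB m) d0).items

-- ===== PRECONDITION & SPEC =====
def Spec_zgeneriraj_pot (n : Int) (m : Int) (out : List (Int × List Int)) : Prop := out = zgeneriraj_pot_alt n m
instance (n : Int) (m : Int) (out : List (Int × List Int)) : Decidable (Spec_zgeneriraj_pot n m out) := by unfold Spec_zgeneriraj_pot; infer_instance

-- ===== CLAIM (what is proved, stated in full; the proofs are below) =====
def Claim_equal_zgeneriraj_pot : Prop := ∀ (n : Int) (m : Int), Dom_zgeneriraj_pot n m → Spec_zgeneriraj_pot n m (zgeneriraj_pot n m)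

-- ===== LEMMAS AND PROOFS =====

-- the key dict both versions start from
def pvD0 (n m : Int) : PySem.Dict Int (List Int) :=
  (PySem.List.pyRange 1 (n + 1)).foldl (fun d i => d.insert (i + m) ([] : List Int)) PySem.Dict.empty

-- the adjacency list both versions end with (for 2 ≤ n, 1 ≤ j ≤ n)
def pvAdj (n m j : Int) : List Int :=
  if j = 1 then [2 + m] else if j = n then [n - 1 + m] else [j + m - 1, j + m + 1]

theorem pvLoop1A_no_early (n m : Int) (h : n ≠ 1) :
    ∀ (l : List Int) (d : PySem.Dict Int (List Int)),
      pvLoop1A n m l d = (l.foldl (fun d i => d.insert (i + m) ([] : List Int)) d, false) := by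
  intro l
  induction l with
  | nil => intro d; rfl
  | cons i rest ih =>
      intro d
      simp [pvLoop1A, h, List.foldl_cons, ih]

theorem pvKeys_D0 (n m : Int) :
    (pvD0 n m).keys = (PySem.List.pyRange 1 (n + 1)).map (· + m) := by
  have hnd : ((PySem.List.pyRange 1 (n + 1)).map (· + m)).Nodup :=
    (PySem.List.nodup_pyRange_one 1 (n + 1)).map (add_left_injective m)
  have h := PySem.Dict.keys_foldl_insert_key (κ := Int) (ν := List Int)
      (PySem.List.pyRange 1 (n + 1)) (· + m) (fun _ _ => []) PySem.Dict.empty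
  rw [pvD0, h]
  have h2 := PySem.Set.update_eq_append_of_disjoint (PySem.Dict.empty : PySem.Dict Int (List Int)).keys
      ((PySem.List.pyRange 1 (n + 1)).map (· + m)) hnd (by simp [PySem.Dict.keys_empty])
  simpa [PySem.Dict.keys_empty] using h2

theorem pvGetD_foldl_insert (m : Int) :
    ∀ (l : List Int) (d : PySem.Dict Int (List Int)) (k : Int),
      ((l.foldl (fun d i => d.insert (i + m) ([] : List Int)) d).getD k []) =
        if (k - m) ∈ l then [] else d.getD k [] := by
  intro l
  induction l with
  | nil => intro d k; simp
  | cons i rest ih =>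
      intro d k
      rw [List.foldl_cons, ih]
      by_cases hr : (k - m) ∈ rest
      · simp [hr]
      · by_cases hk : k = i + m
        · simp [hk]
        · have hne : ¬ (k - m = i) := by omega
          simp [hr, hk, PySem.Dict.getD_insert, hne]

theorem pvGetD_D0 (n m j : Int) (h1 : 1 ≤ j) (h2 : j < n + 1) :
    (pvD0 n m).getD (j + m) [] = [] := by
  rw [pvD0, pvGetD_foldl_insert]
  have hmem : j + m - m ∈ PySem.List.pyRange 1 (n + 1) := by
    rw [PySem.List.mem_pyRange_one]; omega
  simp only [if_pos hmem]

theorem pvUntouchedA (n m j : Int) :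
    ∀ (l : List Int) (d : PySem.Dict Int (List Int)), (∀ i ∈ l, i ≠ j) →
      ((l.foldl (pvStepA n m) d).getD (j + m) []) = d.getD (j + m) [] := by
  intro l
  induction l with
  | nil => intro d _; rfl
  | cons i rest ih =>
      intro d h
      have hij : i ≠ j := h i (by simp)
      have hne : ¬ (j + m = i + m) := by omega
      rw [List.foldl_cons, ih _ (fun x hx => h x (by simp [hx]))]
      unfold pvStepA
      split_ifs <;> simp [PySem.Dict.getD_modify, hne]

theorem pvUntouchedB (m j : Int) :
    ∀ (l : List Int) (d : PySem.Dict Int (List Int)), (∀ i ∈ l, i ≠ j ∧ i + 1 ≠ j) →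
      ((l.foldl (pvStepB m) d).getD (j + m) []) = d.getD (j + m) [] := by
  intro l
  induction l with
  | nil => intro d _; rfl
  | cons i rest ih =>
      intro d h
      obtain ⟨h1, h2⟩ := h i (by simp)
      have hne1 : ¬ (j + m = i + m) := by omega
      have hne2 : ¬ (j + m = i + 1 + m) := by omega
      rw [List.foldl_cons, ih _ (fun x hx => h x (by simp [hx]))]
      unfold pvStepB
      simp [PySem.Dict.getD_modify, hne1, hne2]

theorem pvKeysA_fold (n m : Int) :
    ∀ (l : List Int) (d : PySem.Dict Int (List Int)), (∀ i ∈ l, (i + m) ∈ d.keys) →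
      (l.foldl (pvStepA n m) d).keys = d.keys := by
  intro l
  induction l with
  | nil => intro d _; rfl
  | cons i rest ih =>
      intro d h
      have hmem : (i + m) ∈ d.keys := h i (by simp)
      have hc : d.contains (i + m) = true := (PySem.Dict.contains_iff_mem_keys d _).2 hmem
      have hstep : (pvStepA n m d i).keys = d.keys := by
        unfold pvStepA
        split_ifs
        · rw [PySem.Dict.keys_modify, PySem.Dict.keys_insert_of_contains _ _ hc]
        · rw [PySem.Dict.keys_modify, PySem.Dict.keys_insert_of_contains _ _ hc]
        · have k1 : (d.modify (i + m) [] (fun l => l ++ [i + m - 1])).keys = d.keys := by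
            rw [PySem.Dict.keys_modify, PySem.Dict.keys_insert_of_contains _ _ hc]
          have hc2 : (d.modify (i + m) [] (fun l => l ++ [i + m - 1])).contains (i + m) = true := by
            rw [PySem.Dict.contains_iff_mem_keys, k1]; exact hmem
          rw [PySem.Dict.keys_modify, PySem.Dict.keys_insert_of_contains _ _ hc2, k1]
      rw [List.foldl_cons, ih _ (by rw [hstep]; exact fun x hx => h x (by simp [hx])), hstep]

theorem pvKeysB_fold (m : Int) :
    ∀ (l : List Int) (d : PySem.Dict Int (List Int)),
      (∀ i ∈ l, (i + m) ∈ d.keys ∧ (i + 1 + m) ∈ d.keys) →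
      (l.foldl (pvStepB m) d).keys = d.keys := by
  intro l
  induction l with
  | nil => intro d _; rfl
  | cons i rest ih =>
      intro d h
      obtain ⟨hm1, hm2⟩ := h i (by simp)
      have hc1 : d.contains (i + m) = true := (PySem.Dict.contains_iff_mem_keys d _).2 hm1
      have k1 : (d.modify (i + m) [] (fun l => l ++ [i + 1 + m])).keys = d.keys := by
        rw [PySem.Dict.keys_modify, PySem.Dict.keys_insert_of_contains _ _ hc1]
      have hc2 : (d.modify (i + m) [] (fun l => l ++ [i + 1 + m])).contains (i + 1 + m) = true := by
        rw [PySem.Dict.contains_iff_mem_keys, k1]; exact hm2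
      have hstep : (pvStepB m d i).keys = d.keys := by
        unfold pvStepB
        rw [PySem.Dict.keys_modify, PySem.Dict.keys_insert_of_contains _ _ hc2, k1]
      rw [List.foldl_cons, ih _ (by rw [hstep]; exact fun x hx => h x (by simp [hx])), hstep]

theorem pvGetD_finalA (n m : Int) (hn : 2 ≤ n) (j : Int) (h1 : 1 ≤ j) (h2 : j ≤ n) :
    ((PySem.List.pyRange 1 (n + 1)).foldl (pvStepA n m) (pvD0 n m)).getD (j + m) [] = pvAdj n m j := by
  rw [PySem.List.pyRange_one_append 1 j (n + 1) h1 (by omega),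
      PySem.List.pyRange_one_cons (show j < n + 1 by omega), List.foldl_append, List.foldl_cons]
  have hsuf : ∀ i ∈ PySem.List.pyRange (j + 1) (n + 1), i ≠ j := by
    intro i hi; rw [PySem.List.mem_pyRange_one] at hi; omega
  have hpre : ∀ i ∈ PySem.List.pyRange 1 j, i ≠ j := by
    intro i hi; rw [PySem.List.mem_pyRange_one] at hi; omega
  rw [pvUntouchedA n m j _ _ hsuf]
  have hpreD : ((PySem.List.pyRange 1 j).foldl (pvStepA n m) (pvD0 n m)).getD (j + m) [] = [] := by
    rw [pvUntouchedA n m j _ _ hpre, pvGetD_D0 n m j h1 (by omega)]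
  generalize hd : (PySem.List.pyRange 1 j).foldl (pvStepA n m) (pvD0 n m) = dpre at hpreD ⊢
  unfold pvStepA pvAdj
  by_cases hj1 : j = 1
  · subst hj1
    simp [hpreD]
  · by_cases hjn : j = n
    · subst hjn
      simp [hj1, hpreD]
    · simp [hj1, hjn, hpreD]

theorem pvGetD_finalB (n m : Int) (hn : 2 ≤ n) (j : Int) (h1 : 1 ≤ j) (h2 : j ≤ n) :
    ((PySem.List.pyRange 1 n).foldl (pvStepB m) (pvD0 n m)).getD (j + m) [] = pvAdj n m j := by
  by_cases hj1 : j = 1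
  · subst hj1
    rw [PySem.List.pyRange_one_cons (show (1:Int) < n by omega), List.foldl_cons]
    have hsuf : ∀ i ∈ PySem.List.pyRange (1 + 1) n, i ≠ 1 ∧ i + 1 ≠ 1 := by
      intro i hi; rw [PySem.List.mem_pyRange_one] at hi; omega
    rw [pvUntouchedB m 1 _ _ hsuf]
    have hD0 : (pvD0 n m).getD (1 + m) [] = [] := pvGetD_D0 n m 1 le_rfl (by omega)
    unfold pvStepB pvAdj
    have hne : ¬ ((1:Int) + m = 1 + 1 + m) := by omega
    simp [PySem.Dict.getD_modify, hD0]
  · by_cases hjn : j = n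
    · subst j
      rw [PySem.List.pyRange_one_append 1 (n - 1) n (by omega) (by omega),
          PySem.List.pyRange_one_cons (show n - 1 < n by omega),
          PySem.List.pyRange_one_eq_nil (show n ≤ n - 1 + 1 by omega),
          List.foldl_append, List.foldl_cons, List.foldl_nil]
      have hpre : ∀ i ∈ PySem.List.pyRange 1 (n - 1), i ≠ n ∧ i + 1 ≠ n := by
        intro i hi; rw [PySem.List.mem_pyRange_one] at hi; omega
      have hpreD : ((PySem.List.pyRange 1 (n - 1)).foldl (pvStepB m) (pvD0 n m)).getD (n + m) [] = [] := by
        rw [pvUntouchedB m n _ _ hpre, pvGetD_D0 n m n (by omega) (by omega)]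
      generalize hd : (PySem.List.pyRange 1 (n - 1)).foldl (pvStepB m) (pvD0 n m) = dpre at hpreD ⊢
      unfold pvStepB pvAdj
      have he1 : n + m = n - 1 + 1 + m := by omega
      have hne : ¬ (n - 1 + 1 + m = n - 1 + m) := by omega
      rw [PySem.Dict.getD_modify, if_pos he1, PySem.Dict.getD_modify, if_neg hne, ← he1, hpreD]
      simp [hj1]
    · rw [PySem.List.pyRange_one_append 1 (j - 1) n (by omega) (by omega),
          PySem.List.pyRange_one_cons (show j - 1 < n by omega),
          PySem.List.pyRange_one_cons (show j - 1 + 1 < n by omega),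
          List.foldl_append, List.foldl_cons, List.foldl_cons]
      have hsuf : ∀ i ∈ PySem.List.pyRange (j - 1 + 1 + 1) n, i ≠ j ∧ i + 1 ≠ j := by
        intro i hi; rw [PySem.List.mem_pyRange_one] at hi; omega
      rw [pvUntouchedB m j _ _ hsuf]
      have hpre : ∀ i ∈ PySem.List.pyRange 1 (j - 1), i ≠ j ∧ i + 1 ≠ j := by
        intro i hi; rw [PySem.List.mem_pyRange_one] at hi; omega
      have hpreD : ((PySem.List.pyRange 1 (j - 1)).foldl (pvStepB m) (pvD0 n m)).getD (j + m) [] = [] := by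
        rw [pvUntouchedB m j _ _ hpre, pvGetD_D0 n m j h1 (by omega)]
      have hpreD' : ((PySem.List.pyRange 1 (j - 1)).foldl (pvStepB m) (pvD0 n m)).getD (j - 1 + 1 + m) [] = [] := by
        have : j - 1 + 1 + m = j + m := by omega
        rw [this]; exact hpreD
      generalize hd : (PySem.List.pyRange 1 (j - 1)).foldl (pvStepB m) (pvD0 n m) = dpre at hpreD hpreD' ⊢
      unfold pvStepB pvAdj
      have e1 : j - 1 + 1 = j := by omega
      rw [e1]
      have hne1 : ¬ (j + m = j + 1 + m) := by omega
      have hne2 : ¬ (j + m = j - 1 + m) := by omega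
      rw [PySem.Dict.getD_modify, if_neg hne1, PySem.Dict.getD_modify, if_pos rfl,
          PySem.Dict.getD_modify, if_pos rfl, PySem.Dict.getD_modify, if_neg hne2, hpreD]
      simp [hj1, hjn]
      omega

theorem zgeneriraj_pot_spec : Claim_equal_zgeneriraj_pot := by
  intro n m _
  unfold Spec_zgeneriraj_pot zgeneriraj_pot zgeneriraj_pot_alt
  by_cases hn0 : n ≤ 0
  · rw [PySem.List.pyRange_one_eq_nil (show n + 1 ≤ 1 by omega),
        PySem.List.pyRange_one_eq_nil (show n ≤ 1 by omega)]
    rfl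
  · by_cases hn1 : n = 1
    · subst hn1
      rw [PySem.List.pyRange_one_singleton 1, PySem.List.pyRange_one_eq_nil (le_refl (1:Int))]
      simp [pvLoop1A]
    · have hn2 : 2 ≤ n := by omega
      rw [pvLoop1A_no_early n m hn1]
      show ((PySem.List.pyRange 1 (n + 1)).foldl (pvStepA n m) (pvD0 n m)).items =
        ((PySem.List.pyRange 1 n).foldl (pvStepB m) (pvD0 n m)).items
      have keysD0 := pvKeys_D0 n m
      have hndK : ((PySem.List.pyRange 1 (n + 1)).map (· + m)).Nodup :=
        (PySem.List.nodup_pyRange_one 1 (n + 1)).map (add_left_injective m)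
      have hkA : ((PySem.List.pyRange 1 (n + 1)).foldl (pvStepA n m) (pvD0 n m)).keys = (pvD0 n m).keys := by
        refine pvKeysA_fold n m _ _ ?_
        intro i hi
        rw [keysD0]
        exact List.mem_map_of_mem hi
      have hkB : ((PySem.List.pyRange 1 n).foldl (pvStepB m) (pvD0 n m)).keys = (pvD0 n m).keys := by
        refine pvKeysB_fold m _ _ ?_
        intro i hi
        rw [PySem.List.mem_pyRange_one] at hi
        rw [keysD0]
        constructor
        · exact List.mem_map_of_mem (by rw [PySem.List.mem_pyRange_one]; omega)
        · exact List.mem_map_of_mem (by rw [PySem.List.mem_pyRange_one]; omega)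
      have hnodA : ((PySem.List.pyRange 1 (n + 1)).foldl (pvStepA n m) (pvD0 n m)).keys.Nodup := by
        rw [hkA, keysD0]; exact hndK
      have hnodB : ((PySem.List.pyRange 1 n).foldl (pvStepB m) (pvD0 n m)).keys.Nodup := by
        rw [hkB, keysD0]; exact hndK
      rw [PySem.Dict.items_eq_map_keys _ hnodA [], PySem.Dict.items_eq_map_keys _ hnodB [],
          hkA, hkB, keysD0]
      refine List.map_congr_left ?_
      intro k hk
      obtain ⟨j, hj, rfl⟩ := List.mem_map.1 hk
      rw [PySem.List.mem_pyRange_one] at hj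
      rw [pvGetD_finalA n m hn2 j hj.1 (by omega), pvGetD_finalB n m hn2 j hj.1 (by omega)]
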